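-- pv_equiv track=rewrite | github.com/zn09224/Data-Structures-and-Algorithms | Graph ADT/helper_functions.py | getNearestNeighbor
-- ===== SOURCE A (Python) =====
-- def getNearestNeighbor(G, node):
--     min = G[node][0][1]
--     for i in G[node]:
--         if i[1] <= min:
--             min = i[1]
--
--     for i in G[node]:
--         if i[1] == min:
--             return i[0]
-- ===== SOURCE B (Python) =====
-- def getNearestNeighbor(G, node):
--     neighbors = G[node]
--     best, m = neighbors[0]
--     for n, w in neighbors[1:]:
--         if w < m:
--             best, m = n, w
--     return best
-- ===== Notes on version B (the rewrite author's own statement) =====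
-- stated objective: simpler
-- what changed: B replaces A's two scans (one to compute the minimum weight, one to find the first neighbor carrying it) by a single fused scan that maintains the best (neighbor, weight) pair, updating only on strictly smaller weight to keep the first-occurrence tie-break.
import Mathlib
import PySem

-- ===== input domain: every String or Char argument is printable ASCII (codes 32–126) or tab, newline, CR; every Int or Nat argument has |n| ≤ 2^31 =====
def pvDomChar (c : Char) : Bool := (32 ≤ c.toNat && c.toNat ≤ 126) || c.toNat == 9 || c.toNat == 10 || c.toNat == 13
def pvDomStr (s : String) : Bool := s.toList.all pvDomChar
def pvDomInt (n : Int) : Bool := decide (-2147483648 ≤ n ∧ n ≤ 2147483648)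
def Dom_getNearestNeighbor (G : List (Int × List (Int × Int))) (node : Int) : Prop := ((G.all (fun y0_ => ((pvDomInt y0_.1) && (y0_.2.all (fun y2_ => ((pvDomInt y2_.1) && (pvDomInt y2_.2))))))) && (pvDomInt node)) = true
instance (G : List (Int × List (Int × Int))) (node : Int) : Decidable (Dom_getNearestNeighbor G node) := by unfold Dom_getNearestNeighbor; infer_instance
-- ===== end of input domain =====

-- B fuses A's two scans (minimum weight, then first neighbor with it) into one pass
-- keeping the best (neighbor, weight) pair; objective: simpler (return value only).

-- ===== PORT A =====
-- A: first scan computes the minimum weight (update on ≤), second scan returns the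
-- first neighbor whose weight equals it (the for/if/return loop is find?).
def getNearestNeighbor (G : List (Int × List (Int × Int))) (node : Int) : Int :=
  match G.lookup node with
  | none => 0      -- Python: KeyError, excluded by Pre_
  | some l =>
    match PySem.List.pyGet? l 0 with
    | none => 0    -- Python: IndexError on G[node][0], excluded by Pre_
    | some p0 =>
      let m := l.foldl (fun m i => if i.2 ≤ m then i.2 else m) p0.2
      match l.find? (fun i => i.2 == m) with
      | some i => i.1
      | none => 0  -- Python would fall through (None); unreachable since m occurs in l

-- ===== PORT B =====
def getNearestNeighbor_alt (G : List (Int × List (Int × Int))) (node : Int) : Int :=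
  match G.lookup node with
  | some (h :: t) => (t.foldl (fun p i => if i.2 < p.2 then i else p) h).1
  | _ => 0

-- ===== PRECONDITION & SPEC =====
-- Pre_ excludes exactly the inputs where Python A raises: node not a key of G
-- (KeyError) or its adjacency list empty (IndexError on G[node][0]).
def Pre_getNearestNeighbor (G : List (Int × List (Int × Int))) (node : Int) : Prop :=
  (G.lookup node).getD [] ≠ []
instance (G : List (Int × List (Int × Int))) (node : Int) : Decidable (Pre_getNearestNeighbor G node) := by unfold Pre_getNearestNeighbor; infer_instance
def pvWitness_getNearestNeighbor : (List (Int × List (Int × Int))) × Int := ([(0, [(1, 2), (3, 1)])], 0)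

def Spec_getNearestNeighbor (G : List (Int × List (Int × Int))) (node : Int) (out : Int) : Prop := out = getNearestNeighbor_alt G node
instance (G : List (Int × List (Int × Int))) (node : Int) (out : Int) : Decidable (Spec_getNearestNeighbor G node out) := by unfold Spec_getNearestNeighbor; infer_instance

-- ===== CLAIM (what is proved, stated in full; the proofs are below) =====
def Claim_equal_getNearestNeighbor : Prop := ∀ (G : List (Int × List (Int × Int))) (node : Int), Dom_getNearestNeighbor G node → Pre_getNearestNeighbor G node → Spec_getNearestNeighbor G node (getNearestNeighbor G node)

-- ===== LEMMAS AND PROOFS =====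

-- A's min-accumulation never goes above its start value.
theorem minf_le (t : List (Int × Int)) (m : Int) :
    t.foldl (fun m i => if i.2 ≤ m then i.2 else m) m ≤ m := by
  induction t generalizing m with
  | nil => simp
  | cons a t ih =>
    simp only [List.foldl]
    split
    · exact le_trans (ih _) (by assumption)
    · exact ih _

-- find? on a cons, in if-form.
theorem find?_cons_if {α : Type} (p : α → Bool) (a : α) (l : List α) :
    List.find? p (a :: l) = if p a then some a else List.find? p l := by
  cases hpa : p a <;> simp [hpa]

-- A's second scan (first weight equal to the minimum) returns B's best pair.
theorem find_min_eq_best (t : List (Int × Int)) (h : Int × Int) :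
    List.find? (fun i => i.2 == t.foldl (fun m i => if i.2 ≤ m then i.2 else m) h.2) (h :: t)
      = some (t.foldl (fun p i => if i.2 < p.2 then i else p) h) := by
  induction t generalizing h with
  | nil => simp
  | cons a t ih =>
    simp only [List.foldl]
    by_cases hlt : a.2 < h.2
    · have h1 : (if a.2 ≤ h.2 then a.2 else h.2) = a.2 := by omega
      have h2 : (if a.2 < h.2 then a else h) = a := by simp [hlt]
      rw [h1, h2]
      have hne : (h.2 == t.foldl (fun m i => if i.2 ≤ m then i.2 else m) a.2) = false := by
        have := minf_le t a.2
        rw [beq_eq_false_iff_ne]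
        omega
      have := ih a
      simp only [find?_cons_if] at this ⊢
      rw [this]
      simp [hne]
    · have h2 : (if a.2 < h.2 then a else h) = h := by simp [hlt]
      rw [h2]
      by_cases heq : a.2 ≤ h.2
      · -- a.2 = h.2 : the two head tests coincide
        have hv : a.2 = h.2 := by omega
        have h1 : (if a.2 ≤ h.2 then a.2 else h.2) = h.2 := by omega
        rw [h1]
        have := ih h
        simp only [find?_cons_if] at this ⊢
        rw [hv]
        cases hh : (h.2 == t.foldl (fun m i => if i.2 ≤ m then i.2 else m) h.2) <;>
          simp only [hh] at this ⊢ <;> simpa using this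
      · -- h.2 < a.2 : the a-test is false, the rest matches the IH on (h :: t)
        have h1 : (if a.2 ≤ h.2 then a.2 else h.2) = h.2 := by omega
        rw [h1]
        have hne : (a.2 == t.foldl (fun m i => if i.2 ≤ m then i.2 else m) h.2) = false := by
          have := minf_le t h.2
          rw [beq_eq_false_iff_ne]
          omega
        have := ih h
        simp only [find?_cons_if] at this ⊢
        cases hh : (h.2 == t.foldl (fun m i => if i.2 ≤ m then i.2 else m) h.2)
        · simp only [hh, hne] at this ⊢
          simpa using this
        · simp only [hh] at this ⊢
          simpa using this

-- ===== VERDICT (by name: the statement is the Claim_ definition above) =====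
theorem getNearestNeighbor_spec : Claim_equal_getNearestNeighbor := by
  intro G node _ hPre
  unfold Spec_getNearestNeighbor getNearestNeighbor getNearestNeighbor_alt
  unfold Pre_getNearestNeighbor at hPre
  cases e : G.lookup node with
  | none => rw [e] at hPre
  | some l =>
    rw [e] at hPre
    cases l with
    | nil => simp at hPre
    | cons h t =>
      simp only [PySem.List.pyGet?_zero_cons]
      have hstart : (h :: t).foldl (fun m i => if i.2 ≤ m then i.2 else m) h.2
          = t.foldl (fun m i => if i.2 ≤ m then i.2 else m) h.2 := by
        simp [List.foldl]
      simp only [hstart]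
      rw [find_min_eq_best t h]
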